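-- pv_equiv track=rewrite | github.com/vism2889/code_dump | CMU_15-112/hw2.py | hasEveryDigit
-- ===== SOURCE A (Python) =====
-- def findDigit(dig, n):
--     # helper for hasEveryDigit()
--     while n:
--         m = n % 10
--         if m == dig:
--             return True
--         n //= 10
--     return False
--
-- def hasEveryDigit(n):
--     # helper for hasPoperty309()
--     n = abs(n)
--     count = 0
--     for i in range(10):
--         if findDigit(i,n):
--             count += 1
--     if count == 10:
--         return True
--     return False
-- ===== SOURCE B (Python) =====
-- def hasEveryDigit(n):
--     n = abs(n)
--     digits = set()
--     while n:
--         digits.add(n % 10)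
--         n //= 10
--     return len(digits) == 10
-- ===== Notes on version B (the rewrite author's own statement) =====
-- stated objective: simpler
-- what changed: A loops over the ten target digits and rescans n's digits for each; B scans n's digits once, collecting them into a set, and checks the set has size 10.
import Mathlib
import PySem

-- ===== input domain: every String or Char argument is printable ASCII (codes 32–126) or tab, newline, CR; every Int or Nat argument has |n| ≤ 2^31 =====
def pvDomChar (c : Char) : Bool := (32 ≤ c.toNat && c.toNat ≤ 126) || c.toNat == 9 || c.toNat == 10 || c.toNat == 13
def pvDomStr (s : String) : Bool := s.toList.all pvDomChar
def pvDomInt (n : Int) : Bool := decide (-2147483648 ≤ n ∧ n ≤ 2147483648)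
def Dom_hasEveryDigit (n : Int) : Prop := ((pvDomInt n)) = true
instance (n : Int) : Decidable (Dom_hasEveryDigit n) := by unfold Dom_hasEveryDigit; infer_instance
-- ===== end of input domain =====

-- B replaces A's loop over the ten target digits (each rescanning n) by one scan of n's
-- digits into a set followed by a size check (objective: simpler).

-- ===== PORT A =====
-- A's while-loop runs on abs(n) ≥ 0 only, so it is ported as structural recursion on Nat;
-- for n ≥ 0 Python's % 10 and //= 10 coincide with Nat.mod / Nat.div, so this is exact.
def findDigit (dig : Int) (n : Nat) : Bool :=
  if h : n = 0 then false
  else if ((n % 10 : Nat) : Int) = dig then true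
  else findDigit dig (n / 10)
  termination_by n
  decreasing_by exact Nat.div_lt_self (Nat.pos_of_ne_zero h) (by omega)

def hasEveryDigit (n : Int) : Bool :=
  let m := n.natAbs
  let count := (PySem.List.pyRange 0 10 1).foldl
    (fun c i => if findDigit i m then c + 1 else c) (0 : Int)
  if count = 10 then true else false

-- ===== PORT B =====
-- B's while-loop, also on abs(n) ≥ 0: collect the digits into a Python set.
def digitLoop (digits : PySem.Set Int) (n : Nat) : PySem.Set Int :=
  if h : n = 0 then digits
  else digitLoop (PySem.Set.add digits ((n % 10 : Nat) : Int)) (n / 10)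
  termination_by n
  decreasing_by exact Nat.div_lt_self (Nat.pos_of_ne_zero h) (by omega)

def hasEveryDigit_alt (n : Int) : Bool :=
  decide (PySem.Set.len (digitLoop PySem.Set.empty n.natAbs) = 10)

-- ===== PRECONDITION & SPEC =====
def Spec_hasEveryDigit (n : Int) (out : Bool) : Prop := out = hasEveryDigit_alt n
instance (n : Int) (out : Bool) : Decidable (Spec_hasEveryDigit n out) := by unfold Spec_hasEveryDigit; infer_instance

-- ===== CLAIM (what is proved, stated in full; the proofs are below) =====
def Claim_equal_hasEveryDigit : Prop := ∀ (n : Int), Dom_hasEveryDigit n → Spec_hasEveryDigit n (hasEveryDigit n)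

-- ===== LEMMAS AND PROOFS =====

theorem mem_digitLoop (s : PySem.Set Int) (n : Nat) (d : Int) :
    d ∈ digitLoop s n ↔ d ∈ s ∨ findDigit d n = true := by
  induction s, n using digitLoop.induct with
  | case1 s =>
    rw [digitLoop, findDigit]
    simp
  | case2 s n h ih =>
    rw [digitLoop, findDigit]
    simp only [h, dite_false, ih, PySem.Set.mem_add]
    by_cases hd : ((n % 10 : Nat) : Int) = d
    · simp [hd.symm]
    · have hd' : ¬ d = ((n % 10 : Nat) : Int) := fun e => hd e.symm
      simp only [hd, hd', if_false]
      tauto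

theorem nodup_digitLoop (s : PySem.Set Int) (n : Nat) :
    s.Nodup → (digitLoop s n).Nodup := by
  induction s, n using digitLoop.induct with
  | case1 s => intro hs; rw [digitLoop]; simpa
  | case2 s n h ih =>
    intro hs
    rw [digitLoop]
    simp only [h, dite_false]
    exact ih (PySem.Set.nodup_add s _ hs)

theorem findDigit_range (d : Int) (n : Nat) (h : findDigit d n = true) :
    0 ≤ d ∧ d < 10 := by
  induction n using Nat.strong_induction_on with
  | _ n ih =>
    rw [findDigit] at h
    split_ifs at h with h0 hd
    · have : n % 10 < 10 := Nat.mod_lt _ (by omega)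
      omega
    · exact ih (n / 10) (Nat.div_lt_self (Nat.pos_of_ne_zero h0) (by omega)) h

-- B's result characterised: the digit set has size 10 iff every digit 0..9 occurs.
theorem alt_iff (n : Int) :
    hasEveryDigit_alt n = true ↔ ∀ d : Int, 0 ≤ d → d < 10 → findDigit d n.natAbs = true := by
  set m := n.natAbs with hm
  have hmem : ∀ d : Int, d ∈ digitLoop PySem.Set.empty m ↔ findDigit d m = true := by
    intro d; rw [mem_digitLoop]; simp [PySem.Set.empty]
  have hnd : (digitLoop PySem.Set.empty m).Nodup := nodup_digitLoop _ _ (by simp [PySem.Set.empty])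
  have hfin : (digitLoop PySem.Set.empty m).toFinset
      = (Finset.Icc (0 : Int) 9).filter (fun d => findDigit d m) := by
    ext d
    simp only [List.mem_toFinset, Finset.mem_filter, Finset.mem_Icc, hmem]
    constructor
    · intro h
      have := findDigit_range d m h
      exact ⟨⟨this.1, by omega⟩, h⟩
    · exact fun h => h.2
  have hlen : (digitLoop PySem.Set.empty m).length
      = ((Finset.Icc (0 : Int) 9).filter (fun d => findDigit d m)).card := by
    rw [← hfin, List.toFinset_card_of_nodup hnd]
  unfold hasEveryDigit_alt
  rw [← hm]
  simp only [PySem.Set.len, decide_eq_true_eq]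
  rw [hlen]
  constructor
  · intro hcard d h0 h10
    have hsub : ((Finset.Icc (0 : Int) 9).filter (fun d => findDigit d m)) ⊆ Finset.Icc (0 : Int) 9 :=
      Finset.filter_subset _ _
    have hc : (Finset.Icc (0 : Int) 9).card = 10 := by rw [Int.card_Icc]; rfl
    have heq := Finset.eq_of_subset_of_card_le hsub (by omega)
    have : d ∈ (Finset.Icc (0 : Int) 9) := Finset.mem_Icc.2 ⟨h0, by omega⟩
    rw [← heq] at this
    exact (Finset.mem_filter.1 this).2
  · intro hall
    rw [Finset.filter_true_of_mem (fun d hd => by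
      have := Finset.mem_Icc.1 hd
      exact hall d this.1 (by omega))]
    rw [Int.card_Icc]; rfl

-- A's result characterised the same way.
theorem a_iff (n : Int) :
    hasEveryDigit n = true ↔ ∀ d : Int, 0 ≤ d → d < 10 → findDigit d n.natAbs = true := by
  set m := n.natAbs with hm
  simp only [hasEveryDigit]
  rw [← hm]
  rw [PySem.List.foldl_count_if (fun i => findDigit i m) (PySem.List.pyRange 0 10 1) 0]
  have hlen : (PySem.List.pyRange 0 10 1).length = 10 := by decide
  constructor
  · intro h d h0 h10
    have hcount : List.countP (fun i => findDigit i m) (PySem.List.pyRange 0 10 1)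
        = (PySem.List.pyRange 0 10 1).length := by
      split_ifs at h with hc
      omega
    have := List.countP_eq_length.1 hcount d (PySem.List.mem_pyRange_one.2 ⟨h0, h10⟩)
    exact this
  · intro hall
    have hcount : List.countP (fun i => findDigit i m) (PySem.List.pyRange 0 10 1)
        = (PySem.List.pyRange 0 10 1).length :=
      List.countP_eq_length.2 (fun d hd => by
        have := PySem.List.mem_pyRange_one.1 hd
        exact hall d this.1 this.2)
    rw [hcount, hlen]
    simp

-- ===== VERDICT (by name: the statement is the Claim_ definition above) =====
theorem hasEveryDigit_spec : Claim_equal_hasEveryDigit := by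
  intro n _
  unfold Spec_hasEveryDigit
  rw [Bool.eq_iff_iff, a_iff, alt_iff]
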